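-- pv_equiv track=rewrite | github.com/jluna0413/dmac | analyze_imports.py | get_project_modules
-- ===== SOURCE A (Python) =====
-- def get_project_modules(files):
--     project_modules = set()
--     for file_path in files:
--         if file_path.endswith(".py"):
--             # Convert file path to module path (e.g., agents/coding/agent.py -> agents.coding.agent)
--             module_path = file_path.replace(".py", "").replace("/", ".")
--             project_modules.add(module_path)
--             # Add parent packages as well (e.g., agents.coding, agents)
--             parts = module_path.split('.')
--             for i in range(1, len(parts)):
--                 project_modules.add('.'.join(parts[:i]))
--     return project_modules
-- ===== SOURCE B (Python) =====
-- def get_project_modules(files):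
--     project_modules = set()
--     for file_path in files:
--         if file_path.endswith(".py"):
--             module_path = file_path.replace(".py", "").replace("/", ".")
--             project_modules.add(module_path)
--             # one pass: running prefix instead of re-joining parts[:i] for every i
--             acc = ""
--             for part in module_path.split('.')[:-1]:
--                 acc = acc + part
--                 project_modules.add(acc)
--                 acc = acc + "."
--     return project_modules
-- ===== Notes on version B (the rewrite author's own statement) =====
-- stated objective: alternative
-- what changed: The inner pass that re-joins parts[:i] from scratch for every i in range(1,len(parts)) is replaced by a single left-to-right pass over split('.')[:-1] that maintains a running prefix string and adds it after appending each component.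
import Mathlib
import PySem

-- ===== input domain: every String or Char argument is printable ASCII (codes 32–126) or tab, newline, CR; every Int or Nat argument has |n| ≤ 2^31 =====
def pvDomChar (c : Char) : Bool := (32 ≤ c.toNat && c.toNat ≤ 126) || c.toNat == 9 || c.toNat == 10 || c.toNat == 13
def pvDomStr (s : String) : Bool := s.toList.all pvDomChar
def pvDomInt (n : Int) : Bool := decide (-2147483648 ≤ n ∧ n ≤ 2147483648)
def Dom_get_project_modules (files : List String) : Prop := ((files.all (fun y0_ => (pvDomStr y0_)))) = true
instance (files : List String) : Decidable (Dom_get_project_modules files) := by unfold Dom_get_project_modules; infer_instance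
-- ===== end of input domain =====

-- B replaces A's inner pass that re-joins parts[:i] from scratch for every i by a single pass
-- over split('.')[:-1] maintaining a running prefix string (alternative decomposition; same
-- elements added in the same order). A is total.

-- ===== PORT A =====
-- inner loop of A:  for i in range(1, len(parts)): project_modules.add('.'.join(parts[:i]))
def pvInnerA (parts : List String) (s : PySem.Set String) : PySem.Set String :=
  (PySem.List.pyRange 1 (parts.length : Int) 1).foldl
    (fun s i => PySem.Set.add s (PySem.Str.join "." (PySem.List.slice parts none (some i)))) s

def get_project_modules (files : List String) : List String :=
  files.foldl
    (fun s file_path =>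
      if PySem.Str.endswith file_path ".py" then
        let module_path := PySem.Str.replace (PySem.Str.replace file_path ".py" "") "/" "."
        let s := PySem.Set.add s module_path
        -- module_path.split('.'); the separator "." is nonempty, so split? never returns none
        let parts := (PySem.Str.split? module_path ".").getD []
        pvInnerA parts s
      else s)
    PySem.Set.empty

-- ===== PORT B =====
-- inner loop of B:  for part in module_path.split('.')[:-1]:
--                       acc = acc + part; project_modules.add(acc); acc = acc + "."
def pvInnerB (parts : List String) (s : PySem.Set String) (acc : String) : PySem.Set String :=
  match parts with
  | [] => s
  | p :: t => pvInnerB t (PySem.Set.add s (acc ++ p)) (acc ++ p ++ ".")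

def get_project_modules_alt (files : List String) : List String :=
  files.foldl
    (fun s file_path =>
      if PySem.Str.endswith file_path ".py" then
        let module_path := PySem.Str.replace (PySem.Str.replace file_path ".py" "") "/" "."
        let s := PySem.Set.add s module_path
        -- module_path.split('.')[:-1]; the separator "." is nonempty, so split? never returns none
        pvInnerB (PySem.List.slice ((PySem.Str.split? module_path ".").getD []) none (some (-1))) s ""
      else s)
    PySem.Set.empty

-- ===== PRECONDITION & SPEC =====
def Spec_get_project_modules (files : List String) (out : List String) : Prop := out = get_project_modules_alt files
instance (files : List String) (out : List String) : Decidable (Spec_get_project_modules files out) := by unfold Spec_get_project_modules; infer_instance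

-- ===== CLAIM (what is proved, stated in full; the proofs are below) =====
def Claim_equal_get_project_modules : Prop := ∀ (files : List String), Dom_get_project_modules files → Spec_get_project_modules files (get_project_modules files)

-- ===== LEMMAS AND PROOFS =====

-- B's running accumulator after consuming the leading components `pre`:
-- "" at the start, the joined prefix followed by a trailing "." afterwards.
def pvAccOf (pre : List String) : String :=
  if pre = [] then "" else PySem.Str.join "." pre ++ "."

theorem chars_join_append (l : List (List Char)) (x sep : List Char) (h : l ≠ []) :
    PySem.Chars.join sep (l ++ [x]) = PySem.Chars.join sep l ++ sep ++ x := by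
  induction l with
  | nil => simp at h
  | cons a t ih =>
    cases t with
    | nil => simp [PySem.Chars.join_cons_cons, PySem.Chars.join_singleton]
    | cons b t' =>
      simp only [List.cons_append, PySem.Chars.join_cons_cons]
      rw [← List.cons_append, ih (by simp)]
      simp

theorem pv_join_append_singleton (l : List String) (x : String) (h : l ≠ []) :
    PySem.Str.join "." (l ++ [x]) = PySem.Str.join "." l ++ "." ++ x := by
  apply String.ext
  simp only [String.toList_append, PySem.Str.toList_join, List.map_append, List.map_cons,
    List.map_nil]
  rw [chars_join_append _ _ _ (by simpa using h)]

theorem pv_join_singleton (p : String) : PySem.Str.join "." [p] = p := by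
  apply String.ext
  simp [PySem.Str.toList_join, PySem.Chars.join_singleton]

theorem pv_accOf_append (pre : List String) (p : String) :
    pvAccOf pre ++ p = PySem.Str.join "." (pre ++ [p]) ∧
    pvAccOf (pre ++ [p]) = pvAccOf pre ++ p ++ "." := by
  rcases eq_or_ne pre [] with h | h
  · subst h
    constructor
    · simp [pvAccOf, pv_join_singleton]
    · simp [pvAccOf, pv_join_singleton]
  · have h1 : pvAccOf pre ++ p = PySem.Str.join "." (pre ++ [p]) := by
      rw [pvAccOf, if_neg h, pv_join_append_singleton _ _ h]
    refine ⟨h1, ?_⟩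
    rw [pvAccOf, if_neg (by simp), ← h1]

-- B's inner loop adds exactly the joined prefixes pre ++ t.take 1, …, pre ++ t.take t.length.
theorem pv_innerB_spec (t : List String) (pre : List String) (s : PySem.Set String) :
    pvInnerB t s (pvAccOf pre) =
      ((List.range t.length).map
        (fun k => PySem.Str.join "." (pre ++ t.take (k + 1)))).foldl PySem.Set.add s := by
  induction t generalizing pre s with
  | nil => rfl
  | cons p t' ih =>
    have hacc := pv_accOf_append pre p
    rw [pvInnerB, hacc.1, show PySem.Str.join "." (pre ++ [p]) ++ "." = pvAccOf (pre ++ [p]) from by rw [hacc.2, hacc.1], ih (pre ++ [p])]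
    rw [List.length_cons, List.range_succ_eq_map, List.map_cons, List.foldl_cons, List.map_map]
    have hl : (List.range t'.length).map
        ((fun k => PySem.Str.join "." (pre ++ (p :: t').take (k + 1))) ∘ Nat.succ) =
        (List.range t'.length).map
        (fun k => PySem.Str.join "." ((pre ++ [p]) ++ t'.take (k + 1))) := by
      apply List.map_congr_left
      intro k _
      simp [Function.comp]
    rw [hl]
    simp

-- A's inner loop adds exactly the joined prefixes parts.take 1, …, parts.take (len − 1).
theorem pv_innerA_spec (parts : List String) (s : PySem.Set String) :
    pvInnerA parts s =
      ((List.range (parts.length - 1)).map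
        (fun k => PySem.Str.join "." (parts.take (k + 1)))).foldl PySem.Set.add s := by
  rw [pvInnerA, PySem.List.pyRange_one, List.foldl_map, List.foldl_map,
    show ((parts.length : Int) - 1).toNat = parts.length - 1 by omega]
  apply PySem.List.foldl_congr_mem
  intro acc k hk
  have hk' : k < parts.length - 1 := List.mem_range.mp hk
  rw [show (1 : Int) + (k : Nat) = ((k + 1 : Nat) : Int) by push_cast; ring,
    PySem.List.slice_to_natCast]

theorem pv_inner_eq (parts : List String) (s : PySem.Set String) :
    pvInnerA parts s = pvInnerB (PySem.List.slice parts none (some (-1))) s "" := by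
  rw [PySem.List.slice_to_neg_one,
    show ("" : String) = pvAccOf [] from rfl, pv_innerB_spec, pv_innerA_spec,
    List.length_dropLast]
  congr 1
  apply List.map_congr_left
  intro k hk
  have hk' : k < parts.length - 1 := List.mem_range.mp hk
  rw [List.nil_append, List.dropLast_eq_take, List.take_take,
    show min (k + 1) (parts.length - 1) = k + 1 by omega]

-- ===== VERDICT (by name: the statement is the Claim_ definition above) =====
theorem get_project_modules_spec : Claim_equal_get_project_modules := by
  intro files _
  show get_project_modules files = get_project_modules_alt files
  unfold get_project_modules get_project_modules_alt
  refine congrArg (fun f => List.foldl f PySem.Set.empty files) (funext fun s => funext fun fp => ?_)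
  split_ifs
  · exact pv_inner_eq _ _
  · rfl
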